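-- pv_equiv track=rewrite | github.com/Jhaymayleth/caja | ejercicios/registro de ventas.py | is_product_name_valid
-- ===== SOURCE A (Python) =====
-- def is_product_name_valid(name):
--     if not name.strip():
--         return False, "The name cannot be empty."
--     if name.isdigit():  # if it's only numbers (e.g. "2000", "123")
--         return False, "The product name cannot be only numbers."
--     if any(char.isdigit() for char in name):  # if it contains any digit
--         return False, "The product name cannot contain numbers."
--     return True, ""
-- ===== SOURCE B (Python) =====
-- def is_product_name_valid(name):
--     has_nonspace = False
--     has_digit = False
--     all_digit = True
--     for ch in name:
--         if not ch.isspace():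
--             has_nonspace = True
--         if ch.isdigit():
--             has_digit = True
--         else:
--             all_digit = False
--     if not has_nonspace:
--         return False, "The name cannot be empty."
--     if name and all_digit:
--         return False, "The product name cannot be only numbers."
--     if has_digit:
--         return False, "The product name cannot contain numbers."
--     return True, ""
-- ===== Notes on version B (the rewrite author's own statement) =====
-- stated objective: alternative
-- what changed: Replaces the three separate string scans (strip, isdigit, any-digit generator) by a single pass over the characters that accumulates three flags (has_nonspace, has_digit, all_digit) and decides from the flags afterwards.
import Mathlib
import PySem

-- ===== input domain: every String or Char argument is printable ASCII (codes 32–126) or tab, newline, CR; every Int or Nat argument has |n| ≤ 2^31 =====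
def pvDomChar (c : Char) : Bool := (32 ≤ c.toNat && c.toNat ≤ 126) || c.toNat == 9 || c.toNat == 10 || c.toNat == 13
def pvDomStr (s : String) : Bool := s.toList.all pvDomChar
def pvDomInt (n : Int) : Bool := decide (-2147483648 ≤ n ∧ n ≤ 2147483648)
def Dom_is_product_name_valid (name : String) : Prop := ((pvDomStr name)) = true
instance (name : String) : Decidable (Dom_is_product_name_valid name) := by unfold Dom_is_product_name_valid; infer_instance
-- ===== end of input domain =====

-- B replaces A's three separate scans (strip, isdigit, any-digit) by one pass accumulating three flags; objective: alternative decomposition.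

-- ===== PORT A =====
def is_product_name_valid (name : String) : Bool × String :=
  if PySem.Str.strip name = "" then (false, "The name cannot be empty.")
  else if PySem.Str.strIsdigit name then (false, "The product name cannot be only numbers.")
  else if name.toList.any (fun char => PySem.Chars.isdigit char) then
    (false, "The product name cannot contain numbers.")
  else (true, "")

-- ===== PORT B =====
-- one pass over the characters, accumulating (has_nonspace, has_digit, all_digit)
def is_product_name_valid_alt (name : String) : Bool × String :=
  let st := name.toList.foldl
    (fun (st : Bool × Bool × Bool) ch =>
      (if !PySem.Chars.isspace ch then true else st.1,
       if PySem.Chars.isdigit ch then true else st.2.1,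
       if PySem.Chars.isdigit ch then st.2.2 else false))
    (false, false, true)
  if !st.1 then (false, "The name cannot be empty.")
  else if name ≠ "" && st.2.2 then (false, "The product name cannot be only numbers.")
  else if st.2.1 then (false, "The product name cannot contain numbers.")
  else (true, "")

-- ===== PRECONDITION & SPEC =====
def Spec_is_product_name_valid (name : String) (out : Bool × String) : Prop := out = is_product_name_valid_alt name
instance (name : String) (out : Bool × String) : Decidable (Spec_is_product_name_valid name out) := by unfold Spec_is_product_name_valid; infer_instance

-- ===== CLAIM (what is proved, stated in full; the proofs are below) =====
def Claim_equal_is_product_name_valid : Prop := ∀ (name : String), Dom_is_product_name_valid name → Spec_is_product_name_valid name (is_product_name_valid name)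

-- ===== LEMMAS AND PROOFS =====

theorem pv_fold_flags (cs : List Char) (hn hd ad : Bool) :
    cs.foldl
      (fun (st : Bool × Bool × Bool) ch =>
        (if !PySem.Chars.isspace ch then true else st.1,
         if PySem.Chars.isdigit ch then true else st.2.1,
         if PySem.Chars.isdigit ch then st.2.2 else false))
      (hn, hd, ad)
    = (hn || cs.any (fun c => !PySem.Chars.isspace c),
       hd || cs.any (fun c => PySem.Chars.isdigit c),
       ad && cs.all (fun c => PySem.Chars.isdigit c)) := by
  induction cs generalizing hn hd ad with
  | nil => simp
  | cons c tl ih =>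
    simp only [List.foldl_cons, ih, List.any_cons, List.all_cons]
    by_cases hs : PySem.Chars.isspace c <;> by_cases hdg : PySem.Chars.isdigit c <;>
      simp [hs, hdg]

theorem pv_strip_eq_nil_iff (cs : List Char) :
    PySem.Chars.strip cs = [] ↔ ∀ c ∈ cs, PySem.Chars.isspace c := by
  unfold PySem.Chars.strip PySem.Chars.rstrip PySem.Chars.lstrip
  rw [List.reverse_eq_nil_iff, List.dropWhile_eq_nil_iff]
  constructor
  · intro h c hc
    by_cases hall : List.dropWhile PySem.Chars.isspace cs = []
    · exact (List.dropWhile_eq_nil_iff.mp hall) c hc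
    · obtain ⟨d, tl, hdt⟩ := List.exists_cons_of_ne_nil hall
      have hd : ¬ PySem.Chars.isspace d = true := by
        have := List.head?_dropWhile_not PySem.Chars.isspace cs
        rw [hdt] at this; simpa using this
      have : PySem.Chars.isspace d = true := by
        apply h; rw [hdt]; simp
      exact absurd this hd
  · intro h c hc
    exact h c ((List.dropWhile_sublist _).mem (List.mem_reverse.mp hc))

theorem pv_ports_agree (name : String) :
    is_product_name_valid name = is_product_name_valid_alt name := by
  unfold is_product_name_valid is_product_name_valid_alt
  simp only [pv_fold_flags, Bool.false_or, Bool.true_and]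
  have hstrip : (PySem.Str.strip name = "") ↔
      ¬ (name.toList.any (fun c => !PySem.Chars.isspace c)) = true := by
    unfold PySem.Str.strip
    rw [show ("" : String) = String.ofList [] from rfl, String.ofList_inj,
        pv_strip_eq_nil_iff]
    simp
  have hne : (name ≠ "") ↔ ¬ name.toList = [] := by
    rw [ne_eq, ← String.toList_eq_nil_iff]
  by_cases hs : (name.toList.any (fun c => !PySem.Chars.isspace c)) = true
  · have h1 : ¬ (PySem.Str.strip name = "") := fun h => (hstrip.mp h) hs
    simp only [if_neg h1, hs, Bool.not_true, if_neg (by simp : ¬ (false : Bool) = true)]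
    unfold PySem.Str.strIsdigit PySem.Chars.strIsdigit
    have hnil : ¬ name.toList = [] := by
      intro h; rw [h] at hs; simp at hs
    have hne' : (name ≠ "") := hne.mpr hnil
    simp [hnil, hne', decide_eq_true_eq, PySem.Chars.isdigit]
  · have h1 : PySem.Str.strip name = "" := by
      by_contra h; exact hs (by
        by_contra h2
        exact h (hstrip.mpr h2))
    simp [h1, hs]

-- ===== VERDICT (by name: the statement is the Claim_ definition above) =====
theorem is_product_name_valid_spec : Claim_equal_is_product_name_valid := by
  intro name _
  exact pv_ports_agree name
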